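-- pv_equiv track=rewrite | github.com/Soohan-Park/Practice-CT-2020 | Week02/BP) 모의고사.py | solution
-- ===== SOURCE A (Python) =====
-- def solution(answers):
--     # 수포자별 찍는 방법
--     supo1 = [1, 2, 3, 4, 5]
--     supo2 = [2, 1, 2, 3, 2, 4, 2, 5]
--     supo3 = [3, 3, 1, 1, 2, 2, 4, 4, 5, 5]
--
--     answer = []
--     spam = [0, 0, 0]  # 수포자별 맞은 갯수
--
--     for i in range(len(answers)):
--         target = answers[i]
--
--         # 수포자별 문제를 맞았는지 판단 | 인덱스를 나눠줌으로 계속 반복해서 돌도록 구현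
--         if target == supo1[i % len(supo1)]: spam[0] += 1
--         if target == supo2[i % len(supo2)]: spam[1] += 1
--         if target == supo3[i % len(supo3)]: spam[2] += 1
--
--     # 가장 많이 맞춘 사람 찾아서 answer에 append
--     for i in range(len(spam)):
--         if max(spam) == spam[i]: answer.append(i+1)
--
--     return answer
-- ===== SOURCE B (Python) =====
-- def solution(answers):
--     # Bucket answers by index mod 40 (= lcm of the pattern lengths), then score
--     # each pattern from the buckets with count(): no per-element pattern comparison.
--     buckets = [[] for _ in range(40)]
--     for i, a in enumerate(answers):
--         buckets[i % 40].append(a)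
--     patterns = [[1, 2, 3, 4, 5],
--                 [2, 1, 2, 3, 2, 4, 2, 5],
--                 [3, 3, 1, 1, 2, 2, 4, 4, 5, 5]]
--     scores = [sum(buckets[r].count(p[r % len(p)]) for r in range(40))
--               for p in patterns]
--     best = max(scores)
--     return [k + 1 for k, s in enumerate(scores) if s == best]
-- ===== Notes on version B (the rewrite author's own statement) =====
-- stated objective: alternative
-- what changed: Replaces A's single scan that compares every answer against all three cyclic patterns with a bucket index: one pass groups answers by index mod 40 (the lcm of the pattern lengths), then each pattern's score is read off the 40 buckets with list.count, and a final selection pass picks the top scorers.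
import Mathlib
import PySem

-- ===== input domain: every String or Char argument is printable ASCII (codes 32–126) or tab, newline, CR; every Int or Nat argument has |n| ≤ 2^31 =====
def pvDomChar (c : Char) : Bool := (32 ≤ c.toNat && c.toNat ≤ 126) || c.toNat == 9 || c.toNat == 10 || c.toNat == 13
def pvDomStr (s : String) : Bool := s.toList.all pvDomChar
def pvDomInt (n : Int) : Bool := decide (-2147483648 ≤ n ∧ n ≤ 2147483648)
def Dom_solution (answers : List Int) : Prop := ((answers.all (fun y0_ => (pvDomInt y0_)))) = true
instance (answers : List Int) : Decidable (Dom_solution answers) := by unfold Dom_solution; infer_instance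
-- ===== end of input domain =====

-- B replaces A's single scan with three pattern comparisons per element by a bucket index:
-- one pass groups the answers by index mod 40 (the lcm of the three pattern lengths), then
-- each score is read off the 40 buckets with count() — no per-element pattern comparison
-- remains (alternative decomposition, same asymptotic cost).

-- ===== PORT A =====
def pvSupo1 : List Int := [1, 2, 3, 4, 5]
def pvSupo2 : List Int := [2, 1, 2, 3, 2, 4, 2, 5]
def pvSupo3 : List Int := [3, 3, 1, 1, 2, 2, 4, 4, 5, 5]

-- the single interleaved loop: for i in range(len(answers)) with three ifs on spam
def solution (answers : List Int) : List Int :=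
  let spam : Int × Int × Int :=
    (PySem.List.enumerate answers 0).foldl
      (fun s q =>
        let target := q.2
        let s := if target = PySem.List.pyGetD pvSupo1 (PySem.Int.mod q.1 (pvSupo1.length : Int)) 0
                 then (s.1 + 1, s.2.1, s.2.2) else s
        let s := if target = PySem.List.pyGetD pvSupo2 (PySem.Int.mod q.1 (pvSupo2.length : Int)) 0
                 then (s.1, s.2.1 + 1, s.2.2) else s
        if target = PySem.List.pyGetD pvSupo3 (PySem.Int.mod q.1 (pvSupo3.length : Int)) 0
        then (s.1, s.2.1, s.2.2 + 1) else s)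
      (0, 0, 0)
  -- for i in range(3): if max(spam) == spam[i]: answer.append(i+1)  (loop of fixed length 3, unrolled)
  let m := max (max spam.1 spam.2.1) spam.2.2
  let answer : List Int := []
  let answer := if m = spam.1 then answer ++ [1] else answer
  let answer := if m = spam.2.1 then answer ++ [2] else answer
  let answer := if m = spam.2.2 then answer ++ [3] else answer
  answer

-- ===== PORT B =====
def solution_alt (answers : List Int) : List Int :=
  -- buckets = [[] for _ in range(40)]; for i, a in enumerate(answers): buckets[i % 40].append(a)
  let buckets0 : List (List Int) := (PySem.List.pyRange 0 40 1).map (fun _ => [])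
  let buckets :=
    (PySem.List.enumerate answers 0).foldl
      (fun b q => PySem.List.pySetD b (PySem.Int.mod q.1 40)
                    (PySem.List.pyGetD b (PySem.Int.mod q.1 40) [] ++ [q.2])) buckets0
  let patterns : List (List Int) :=
    [[1, 2, 3, 4, 5], [2, 1, 2, 3, 2, 4, 2, 5], [3, 3, 1, 1, 2, 2, 4, 4, 5, 5]]
  -- scores = [sum(buckets[r].count(p[r % len(p)]) for r in range(40)) for p in patterns]
  let scores := patterns.map (fun p =>
    (PySem.List.pyRange 0 40 1).foldl
      (fun acc r => acc +
        ((PySem.List.pyGetD buckets r []).count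
           (PySem.List.pyGetD p (PySem.Int.mod r (p.length : Int)) 0) : Int)) 0)
  let best := (PySem.List.max? scores (fun y => y)).getD 0
  ((PySem.List.enumerate scores 0).filter (fun q => q.2 = best)).map (fun q => q.1 + 1)

-- ===== PRECONDITION & SPEC =====
def Spec_solution (answers : List Int) (out : List Int) : Prop := out = solution_alt answers
instance (answers : List Int) (out : List Int) : Decidable (Spec_solution answers out) := by unfold Spec_solution; infer_instance

-- ===== CLAIM (what is proved, stated in full; the proofs are below) =====
def Claim_equal_solution : Prop := ∀ (answers : List Int), Dom_solution answers → Spec_solution answers (solution answers)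

-- ===== LEMMAS AND PROOFS =====

-- B's per-pattern score read off a bucket list (defeq to the port's inner fold)
def pvBsum (p : List Int) (b : List (List Int)) : Int :=
  (PySem.List.pyRange 0 40 1).foldl
    (fun acc r => acc +
      ((PySem.List.pyGetD b r []).count
         (PySem.List.pyGetD p (PySem.Int.mod r (p.length : Int)) 0) : Int)) 0

-- the per-pattern score as a fold over the enumerated answers (the form A's loop maintains)
def pvEscore (p : List Int) (s : Int) (xs : List Int) : Int :=
  (PySem.List.enumerate xs s).foldl
    (fun acc q => acc +
      (if q.2 = PySem.List.pyGetD p (PySem.Int.mod q.1 (p.length : Int)) 0 then 1 else 0)) 0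

-- B's bucket list after the building pass (defeq to the port's fold)
def pvBuckets (answers : List Int) : List (List Int) :=
  (PySem.List.enumerate answers 0).foldl
    (fun b q => PySem.List.pySetD b (PySem.Int.mod q.1 40)
                  (PySem.List.pyGetD b (PySem.Int.mod q.1 40) [] ++ [q.2]))
    ((PySem.List.pyRange 0 40 1).map (fun _ => []))

theorem pvRange40 : PySem.List.pyRange 0 40 1 = (List.range 40).map (Nat.cast : Nat → Int) := by decide

theorem pvBsum_eq_sum (p : List Int) (b : List (List Int)) :
    pvBsum p b
      = ((List.range 40).map (fun (j : Nat) =>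
           ((b.getD j []).count
              (PySem.List.pyGetD p (PySem.Int.mod (j : Int) (p.length : Int)) 0) : Int))).sum := by
  unfold pvBsum
  simp only [pvRange40, List.foldl_map]
  rw [PySem.List.foldl_add]
  simp only [PySem.List.pyGetD_natCast, zero_add]

-- updating one bucket changes the per-index range-sum by the delta at that bucket
theorem pvSum_range_set (g : Nat → List Int → Int) (b : List (List Int)) (t : Nat) (v : List Int)
    (ht : t < b.length) :
    ((List.range b.length).map (fun j => g j ((b.set t v).getD j []))).sum
      = ((List.range b.length).map (fun j => g j (b.getD j []))).sum + (g t v - g t (b.getD t [])) := by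
  induction b generalizing t g with
  | nil => simp at ht
  | cons x bs ih =>
    simp only [List.length_cons] at ht
    rw [List.length_cons, List.range_succ_eq_map]
    cases t with
    | zero =>
      simp only [List.set_cons_zero, List.map_cons, List.map_map, List.sum_cons,
                 List.getD_cons_zero, Function.comp_def, List.getD_cons_succ]
      ring
    | succ t =>
      simp only [List.set_cons_succ, List.map_cons, List.map_map, List.sum_cons,
                 List.getD_cons_zero, Function.comp_def, List.getD_cons_succ]
      rw [ih (fun j l => g (j + 1) l) t (by omega)]
      ring

theorem pvBucket_step (p : List Int) (hp : 0 < p.length) (hd : p.length ∣ 40)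
    (b : List (List Int)) (hb : b.length = 40) (s x : Int) :
    pvBsum p (PySem.List.pySetD b (PySem.Int.mod s 40)
               (PySem.List.pyGetD b (PySem.Int.mod s 40) [] ++ [x]))
      = pvBsum p b
        + (if x = PySem.List.pyGetD p (PySem.Int.mod s (p.length : Int)) 0 then 1 else 0) := by
  have hm : 0 ≤ PySem.Int.mod s 40 := PySem.Int.mod_nonneg s (by norm_num)
  have hlt : PySem.Int.mod s 40 < 40 := PySem.Int.mod_lt s (by norm_num)
  have htc : PySem.Int.mod s 40 = ((PySem.Int.mod s 40).toNat : Int) := (Int.toNat_of_nonneg hm).symm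
  have hL : (0 : Int) < (p.length : Int) := by exact_mod_cast hp
  have hkey : PySem.Int.mod (((PySem.Int.mod s 40).toNat : Nat) : Int) (p.length : Int)
      = PySem.Int.mod s (p.length : Int) := by
    rw [← htc, PySem.Int.mod_eq_emod_of_pos hL,
        PySem.Int.mod_eq_emod_of_pos (by norm_num : (0:Int) < 40),
        PySem.Int.mod_eq_emod_of_pos hL,
        Int.emod_emod_of_dvd s (by exact_mod_cast Int.natCast_dvd_natCast.mpr hd)]
  have ht' : (PySem.Int.mod s 40).toNat < b.length := by omega
  rw [htc, PySem.List.pySetD_natCast, PySem.List.pyGetD_natCast, pvBsum_eq_sum, pvBsum_eq_sum]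
  have h := pvSum_range_set
      (fun j l => ((l.count (PySem.List.pyGetD p (PySem.Int.mod (j : Int) (p.length : Int)) 0)) : Int))
      b ((PySem.Int.mod s 40).toNat) (b.getD ((PySem.Int.mod s 40).toNat) [] ++ [x]) ht'
  simp only [] at h
  rw [hb] at h
  rw [h, List.count_append]
  have hcnt : (([x].count
        (PySem.List.pyGetD p (PySem.Int.mod (((PySem.Int.mod s 40).toNat : Nat) : Int) (p.length : Int)) 0)) : Int)
      = if x = PySem.List.pyGetD p (PySem.Int.mod s (p.length : Int)) 0 then 1 else 0 := by
    rw [hkey]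
    by_cases hx : x = PySem.List.pyGetD p (PySem.Int.mod s (p.length : Int)) 0 <;>
      simp [hx]
  push_cast
  push_cast at hcnt
  rw [hcnt]
  ring

-- shift the accumulator of the per-pattern score fold
theorem pvEscore_from (p : List Int) (xs : List Int) (s a : Int) :
    (PySem.List.enumerate xs s).foldl
      (fun acc q => acc +
        (if q.2 = PySem.List.pyGetD p (PySem.Int.mod q.1 (p.length : Int)) 0 then 1 else 0)) a
      = a + (PySem.List.enumerate xs s).foldl
              (fun acc q => acc +
                (if q.2 = PySem.List.pyGetD p (PySem.Int.mod q.1 (p.length : Int)) 0 then 1 else 0)) 0 := by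
  induction xs generalizing s a with
  | nil => simp [PySem.List.enumerate_nil]
  | cons x t ih =>
    simp only [PySem.List.enumerate_cons, List.foldl_cons]
    rw [ih (s + 1), ih (s + 1) (0 + _)]
    ring

-- one full pass of B's bucket-building loop adds the per-pattern score
theorem pvBuild (p : List Int) (hp : 0 < p.length) (hd : p.length ∣ 40)
    (xs : List Int) (s : Int) (b : List (List Int)) (hb : b.length = 40) :
    pvBsum p ((PySem.List.enumerate xs s).foldl
        (fun b q => PySem.List.pySetD b (PySem.Int.mod q.1 40)
                      (PySem.List.pyGetD b (PySem.Int.mod q.1 40) [] ++ [q.2])) b)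
      = pvBsum p b + pvEscore p s xs := by
  induction xs generalizing s b with
  | nil => simp [PySem.List.enumerate_nil, pvEscore]
  | cons x t ih =>
    have hb' : (PySem.List.pySetD b (PySem.Int.mod s 40)
                  (PySem.List.pyGetD b (PySem.Int.mod s 40) [] ++ [x])).length = 40 := by
      rw [PySem.List.length_pySetD]; exact hb
    simp only [PySem.List.enumerate_cons, List.foldl_cons]
    rw [ih (s + 1) _ hb', pvBucket_step p hp hd b hb s x]
    simp only [pvEscore, PySem.List.enumerate_cons, List.foldl_cons]
    rw [pvEscore_from p t (s + 1)
          ((0 : Int) + if x = PySem.List.pyGetD p (PySem.Int.mod s (p.length : Int)) 0 then 1 else 0)]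
    ring

theorem pvBsum_buckets (p : List Int) (hp : 0 < p.length) (hd : p.length ∣ 40)
    (h0 : pvBsum p ((PySem.List.pyRange 0 40 1).map (fun _ => ([] : List Int))) = 0)
    (answers : List Int) :
    pvBsum p (pvBuckets answers) = pvEscore p 0 answers := by
  unfold pvBuckets
  rw [pvBuild p hp hd answers 0 _ (by decide), h0, zero_add]

-- B computed on the three concrete patterns
theorem pvAlt (answers : List Int) :
    solution_alt answers
      = ((PySem.List.enumerate
            [pvEscore pvSupo1 0 answers, pvEscore pvSupo2 0 answers, pvEscore pvSupo3 0 answers] 0).filter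
           (fun q => q.2 = (PySem.List.max?
              [pvEscore pvSupo1 0 answers, pvEscore pvSupo2 0 answers, pvEscore pvSupo3 0 answers]
              (fun y => y)).getD 0)).map (fun q => q.1 + 1) := by
  have e1 : pvBsum pvSupo1 (pvBuckets answers) = pvEscore pvSupo1 0 answers :=
    pvBsum_buckets pvSupo1 (by decide) (by decide) (by decide) answers
  have e2 : pvBsum pvSupo2 (pvBuckets answers) = pvEscore pvSupo2 0 answers :=
    pvBsum_buckets pvSupo2 (by decide) (by decide) (by decide) answers
  have e3 : pvBsum pvSupo3 (pvBuckets answers) = pvEscore pvSupo3 0 answers :=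
    pvBsum_buckets pvSupo3 (by decide) (by decide) (by decide) answers
  show ((PySem.List.enumerate
          [pvBsum pvSupo1 (pvBuckets answers), pvBsum pvSupo2 (pvBuckets answers),
           pvBsum pvSupo3 (pvBuckets answers)] 0).filter
         (fun q => q.2 = (PySem.List.max?
            [pvBsum pvSupo1 (pvBuckets answers), pvBsum pvSupo2 (pvBuckets answers),
             pvBsum pvSupo3 (pvBuckets answers)] (fun y => y)).getD 0)).map (fun q => q.1 + 1) = _
  rw [e1, e2, e3]

-- A's interleaved fold computes the triple of the three per-pattern scores
theorem pvFused (xs : List Int) (s a b c : Int) :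
    (PySem.List.enumerate xs s).foldl
      (fun t q =>
        let target := q.2
        let t := if target = PySem.List.pyGetD pvSupo1 (PySem.Int.mod q.1 (pvSupo1.length : Int)) 0
                 then (t.1 + 1, t.2.1, t.2.2) else t
        let t := if target = PySem.List.pyGetD pvSupo2 (PySem.Int.mod q.1 (pvSupo2.length : Int)) 0
                 then (t.1, t.2.1 + 1, t.2.2) else t
        if target = PySem.List.pyGetD pvSupo3 (PySem.Int.mod q.1 (pvSupo3.length : Int)) 0
        then (t.1, t.2.1, t.2.2 + 1) else t)
      (a, b, c)
    = (a + pvEscore pvSupo1 s xs, b + pvEscore pvSupo2 s xs, c + pvEscore pvSupo3 s xs) := by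
  simp only [pvEscore]
  induction xs generalizing s a b c with
  | nil => simp [PySem.List.enumerate_nil]
  | cons x t ih =>
    simp only [PySem.List.enumerate_cons, List.foldl_cons]
    split_ifs <;> rw [ih] <;>
      simp only [zero_add, pvEscore_from pvSupo1 t (s+1) 1, pvEscore_from pvSupo2 t (s+1) 1,
                 pvEscore_from pvSupo3 t (s+1) 1, Prod.mk.injEq] <;>
      and_intros <;> first | trivial | ring

-- the selection stage: A's unrolled three-way append equals B's filter/map over the score list
theorem pvSelect (c1 c2 c3 : Int) :
    (if max (max c1 c2) c3 = c3 then
       (if max (max c1 c2) c3 = c2 then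
          (if max (max c1 c2) c3 = c1 then ([] : List Int) ++ [1] else []) ++ [2]
        else (if max (max c1 c2) c3 = c1 then ([] : List Int) ++ [1] else [])) ++ [3]
     else (if max (max c1 c2) c3 = c2 then
          (if max (max c1 c2) c3 = c1 then ([] : List Int) ++ [1] else []) ++ [2]
        else (if max (max c1 c2) c3 = c1 then ([] : List Int) ++ [1] else [])))
    = ((PySem.List.enumerate [c1, c2, c3] 0).filter
         (fun q => q.2 = (PySem.List.max? [c1, c2, c3] (fun y => y)).getD 0)).map
        (fun q => q.1 + 1) := by
  simp only [PySem.List.max?_id_cons, Option.getD_some, List.foldl_cons, List.foldl_nil,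
             PySem.List.enumerate_cons, PySem.List.enumerate_nil, List.filter_cons, List.filter_nil,
             decide_eq_true_eq, zero_add]
  norm_num
  split_ifs <;> first | rfl | (exfalso; omega)

-- ===== VERDICT (by name: the statement is the Claim_ definition above) =====
set_option maxRecDepth 65536 in
theorem solution_spec : Claim_equal_solution := by
  intro answers _
  show solution answers = solution_alt answers
  rw [pvAlt answers]
  unfold solution
  rw [pvFused answers 0 0 0 0]
  simp only [zero_add]
  exact pvSelect _ _ _
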